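-- pv_equiv track=rewrite | github.com/Pathornnnnn/OOD | Lab9-Recursive/group-of-no1.py | group_of_no_1
-- ===== SOURCE A (Python) =====
-- def group_of_no_1(island_list, point_no):
--     if point_no > len(island_list):
--         return 0
--
--     if island_list[point_no - 1] == 0:
--         return 0
--
--     if island_list[point_no - 1] == 1:
--         return 1 + group_of_no_1(island_list, point_no + 1)
--
--     # เผื่อกรณีที่ list มีค่าอื่นนอกจาก 0/1
--     return 1
-- ===== SOURCE B (Python) =====
-- def group_of_no_1(island_list, point_no):
--     count = 0
--     while point_no <= len(island_list):
--         v = island_list[point_no - 1]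
--         if v == 0:
--             return count
--         if v == 1:
--             count += 1
--             point_no += 1
--         else:
--             return count + 1
--     return count
-- ===== Notes on version B (the rewrite author's own statement) =====
-- stated objective: idiomatic
-- what changed: Replaced the non-tail recursion building 1 + (...) with an iterative while-loop carrying a running count accumulator.
import Mathlib
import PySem

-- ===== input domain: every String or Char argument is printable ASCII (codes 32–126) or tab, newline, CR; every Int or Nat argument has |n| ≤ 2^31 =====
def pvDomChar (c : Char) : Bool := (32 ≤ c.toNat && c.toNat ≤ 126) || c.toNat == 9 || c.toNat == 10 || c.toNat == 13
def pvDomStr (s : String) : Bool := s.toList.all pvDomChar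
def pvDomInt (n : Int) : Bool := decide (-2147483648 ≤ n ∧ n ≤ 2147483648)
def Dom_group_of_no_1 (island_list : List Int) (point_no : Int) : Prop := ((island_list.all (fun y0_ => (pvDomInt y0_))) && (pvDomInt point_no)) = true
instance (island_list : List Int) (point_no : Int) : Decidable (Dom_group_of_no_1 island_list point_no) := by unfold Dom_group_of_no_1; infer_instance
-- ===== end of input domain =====

-- B replaces A's non-tail recursion by an iterative loop with a running-count accumulator; return value only.

-- ===== PORT A =====
-- literal port of A's recursion; pyGet? = none is Python's IndexError, excluded by Pre_
def group_of_no_1 (island_list : List Int) (point_no : Int) : Int :=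
  if point_no > (island_list.length : Int) then 0
  else
    match PySem.List.pyGet? island_list (point_no - 1) with
    | none => 0  -- IndexError in Python; outside Pre_
    | some v =>
      if v = 0 then 0
      else if v = 1 then 1 + group_of_no_1 island_list (point_no + 1)
      else 1
termination_by ((island_list.length : Int) + 1 - point_no).toNat
decreasing_by omega

-- ===== PORT B =====
-- the while-loop of Source B as a tail recursion over (point_no, count)
def groupLoop (island_list : List Int) (point_no : Int) (count : Int) : Int :=
  if point_no > (island_list.length : Int) then count
  else
    match PySem.List.pyGet? island_list (point_no - 1) with
    | none => count  -- IndexError in Python; outside Pre_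
    | some v =>
      if v = 0 then count
      else if v = 1 then groupLoop island_list (point_no + 1) (count + 1)
      else count + 1
termination_by ((island_list.length : Int) + 1 - point_no).toNat
decreasing_by omega

def group_of_no_1_alt (island_list : List Int) (point_no : Int) : Int :=
  groupLoop island_list point_no 0

-- ===== PRECONDITION & SPEC =====
-- Pre_ excludes exactly the inputs where Python raises IndexError (point_no below 1 - len,
-- i.e. island_list[point_no - 1] out of range even after negative-index wraparound).
def Pre_group_of_no_1 (island_list : List Int) (point_no : Int) : Prop :=
  1 - (island_list.length : Int) ≤ point_no
instance (island_list : List Int) (point_no : Int) : Decidable (Pre_group_of_no_1 island_list point_no) := by unfold Pre_group_of_no_1; infer_instance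

def pvWitness_group_of_no_1 : List Int × Int := ([1, 1, 0, 1], 1)

def Spec_group_of_no_1 (island_list : List Int) (point_no : Int) (out : Int) : Prop := out = group_of_no_1_alt island_list point_no
instance (island_list : List Int) (point_no : Int) (out : Int) : Decidable (Spec_group_of_no_1 island_list point_no out) := by unfold Spec_group_of_no_1; infer_instance

-- ===== CLAIM (what is proved, stated in full; the proofs are below) =====
def Claim_equal_group_of_no_1 : Prop := ∀ (island_list : List Int) (point_no : Int), Dom_group_of_no_1 island_list point_no → Pre_group_of_no_1 island_list point_no → Spec_group_of_no_1 island_list point_no (group_of_no_1 island_list point_no)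

-- ===== LEMMAS AND PROOFS =====

-- loop invariant: the accumulator just adds to A's recursive value (holds for all inputs)
theorem groupLoop_eq (island_list : List Int) (point_no count : Int) :
    groupLoop island_list point_no count = count + group_of_no_1 island_list point_no := by
  rw [groupLoop, group_of_no_1]
  split
  · omega
  · cases h : PySem.List.pyGet? island_list (point_no - 1) with
    | none => simp
    | some v =>
      by_cases h0 : v = 0
      · simp [h0]
      · by_cases h1 : v = 1
        · subst h1
          norm_num
          rw [groupLoop_eq island_list (point_no + 1) (count + 1)]
          ring
        · simp [h0, h1]
termination_by ((island_list.length : Int) + 1 - point_no).toNat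
decreasing_by omega

-- ===== VERDICT (by name: the statement is the Claim_ definition above) =====
theorem group_of_no_1_spec : Claim_equal_group_of_no_1 := by
  intro island_list point_no _ _
  unfold Spec_group_of_no_1 group_of_no_1_alt
  rw [groupLoop_eq]; ring
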